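-- pv_equiv track=rewrite | github.com/Otina12/AdventOfCode | 2025/day_05/part1.py | exists_in_interval_bs
-- ===== SOURCE A (Python) =====
-- def exists_in_interval_bs(intervals, target):
--     left, right = 0, len(intervals) - 1
--
--     while left <= right:
--         mid = left + (right - left) // 2
--         start, end = intervals[mid]
--
--         if target < start:
--             right = mid - 1
--         elif target > end:
--             left = mid + 1
--         else:
--             return True
--
--     return False
-- ===== SOURCE B (Python) =====
-- def exists_in_interval_bs(intervals, target):
--     # Build a balanced BST (midpoint rule (len-1)//2, same as A's probe order),
--     # then search it with a plain tree walk.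
--     def build(xs):
--         if not xs:
--             return None
--         m = (len(xs) - 1) // 2
--         return (build(xs[:m]), xs[m], build(xs[m + 1:]))
--
--     def search(t):
--         while t is not None:
--             lt, (start, end), rt = t
--             if target < start:
--                 t = lt
--             elif target > end:
--                 t = rt
--             else:
--                 return True
--         return False
--
--     return search(build(intervals))
-- ===== Notes on version B (the rewrite author's own statement) =====
-- stated objective: alternative
-- what changed: Replaces the iterative left/right-index binary search by a two-stage algorithm: first build an explicit balanced binary search tree from the interval list (same midpoint rule, so the same probe order), then answer by a plain BST walk.
import Mathlib
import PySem

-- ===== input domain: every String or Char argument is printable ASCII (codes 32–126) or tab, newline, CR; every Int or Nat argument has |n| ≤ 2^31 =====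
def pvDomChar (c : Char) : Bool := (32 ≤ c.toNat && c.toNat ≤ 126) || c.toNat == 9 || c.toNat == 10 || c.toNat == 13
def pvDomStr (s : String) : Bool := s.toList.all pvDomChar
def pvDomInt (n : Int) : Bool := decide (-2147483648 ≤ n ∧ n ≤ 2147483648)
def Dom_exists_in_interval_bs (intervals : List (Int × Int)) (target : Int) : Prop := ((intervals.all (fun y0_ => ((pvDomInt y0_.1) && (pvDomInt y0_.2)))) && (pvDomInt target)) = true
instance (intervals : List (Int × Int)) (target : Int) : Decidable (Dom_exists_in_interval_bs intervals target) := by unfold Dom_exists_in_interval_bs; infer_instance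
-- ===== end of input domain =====

-- B replaces A's iterative index-bound binary search by a two-stage algorithm:
-- build an explicit balanced BST from the list (same midpoint rule), then a plain
-- tree search; objective: alternative (same probe order, different data structure).
-- In port A the Nat 'fuel' and the 'none' index branch are totality guards only:
-- fuel = length + 1 always suffices and the index is always in range.


-- ===== PORT A =====
-- A's while loop over the index bounds (left, right).
def bsLoopA (fuel : Nat) (intervals : List (Int × Int)) (target left right : Int) : Bool :=
  match fuel with
  | 0 => false
  | fuel + 1 =>
    if left ≤ right then
      let mid := left + PySem.Int.floordiv (right - left) 2
      match PySem.List.pyGet? intervals mid with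
      | none => false
      | some (s, e) =>
        if target < s then bsLoopA fuel intervals target left (mid - 1)
        else if target > e then bsLoopA fuel intervals target (mid + 1) right
        else true
    else false

def exists_in_interval_bs (intervals : List (Int × Int)) (target : Int) : Bool :=
  bsLoopA (intervals.length + 1) intervals target 0 ((intervals.length : Int) - 1)

-- ===== PORT B =====
-- B's balanced BST: None -> leaf, (l, (s, e), r) -> node l s e r.
inductive IvTree : Type where
  | leaf : IvTree
  | node : IvTree → Int → Int → IvTree → IvTree
deriving DecidableEq, Repr

-- Source B's build: midpoint element at (len-1)//2, children from xs[:m] and xs[m+1:].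
def ivBuild (xs : List (Int × Int)) : IvTree :=
  if h : xs = [] then .leaf
  else
    have hm : (xs.length - 1) / 2 < xs.length := by
      have : xs.length ≠ 0 := by simpa using h
      omega
    let p := xs[(xs.length - 1) / 2]'hm
    .node (ivBuild (xs.take ((xs.length - 1) / 2))) p.1 p.2
          (ivBuild (xs.drop ((xs.length - 1) / 2 + 1)))
termination_by xs.length
decreasing_by
  · simp only [List.length_take]; omega
  · simp only [List.length_drop]; omega

-- Source B's search loop as structural recursion on the tree.
def ivSearch (target : Int) : IvTree → Bool
  | .leaf => false
  | .node lt s e rt =>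
    if target < s then ivSearch target lt
    else if target > e then ivSearch target rt
    else true

def exists_in_interval_bs_alt (intervals : List (Int × Int)) (target : Int) : Bool :=
  ivSearch target (ivBuild intervals)

-- ===== PRECONDITION & SPEC =====
def Spec_exists_in_interval_bs (intervals : List (Int × Int)) (target : Int) (out : Bool) : Prop := out = exists_in_interval_bs_alt intervals target
instance (intervals : List (Int × Int)) (target : Int) (out : Bool) : Decidable (Spec_exists_in_interval_bs intervals target out) := by unfold Spec_exists_in_interval_bs; infer_instance

-- ===== CLAIM (what is proved, stated in full; the proofs are below) =====
def Claim_equal_exists_in_interval_bs : Prop := ∀ (intervals : List (Int × Int)) (target : Int), Dom_exists_in_interval_bs intervals target → Spec_exists_in_interval_bs intervals target (exists_in_interval_bs intervals target)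

-- ===== LEMMAS AND PROOFS =====

-- A's loop on bounds (l, r) computes B's tree search on the tree built from intervals[l..r].
lemma bsLoopA_eq_search : ∀ (fuel : Nat) (intervals : List (Int × Int)) (target l r : Int),
    0 ≤ l → r < (intervals.length : Int) → (r + 1 - l).toNat < fuel →
    bsLoopA fuel intervals target l r =
      ivSearch target (ivBuild ((intervals.drop l.toNat).take (r + 1 - l).toNat)) := by
  intro fuel
  induction fuel with
  | zero => intro _ _ _ _ _ _ hf; omega
  | succ fuel IH =>
    intro intervals target l r hl hr hf
    rw [bsLoopA]
    by_cases hlr : l ≤ r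
    · simp only [if_pos hlr]
      set t : Int := PySem.Int.floordiv (r - l) 2 with ht
      have htv : t = (((r - l).toNat / 2 : Nat) : Int) := by
        have hcast : ((r - l).toNat : Int) = r - l := by omega
        rw [ht, ← hcast]
        exact_mod_cast PySem.Int.floordiv_natCast (r - l).toNat 2
      have htb : 0 ≤ t ∧ t ≤ r - l := by rw [htv]; omega
      set xs := (intervals.drop l.toNat).take (r + 1 - l).toNat with hxs
      have hlen : xs.length = (r + 1 - l).toNat := by
        simp only [hxs, List.length_take, List.length_drop]; omega
      have hxsne : xs ≠ [] := by
        intro h; rw [h] at hlen; simp at hlen; omega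
      set m : Nat := (xs.length - 1) / 2 with hm
      have hmval : m = (r - l).toNat / 2 := by rw [hm, hlen]; omega
      have hmt : (m : Int) = t := by rw [hmval, htv]
      have hmlt : m < xs.length := by rw [hlen]; omega
      have hmidrange : (l + t).toNat < intervals.length := by omega
      have hgetA : PySem.List.pyGet? intervals (l + t) =
          some intervals[(l + t).toNat] := by
        conv_lhs => rw [show l + t = (((l + t).toNat : Nat) : Int) by omega]
        rw [PySem.List.pyGet?_natCast, List.getElem?_eq_getElem hmidrange]
      have hxsm : xs[m]'hmlt = intervals[(l + t).toNat] := by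
        simp only [hxs, List.getElem_take, List.getElem_drop]
        congr 1; omega
      rw [ivBuild]
      simp only [dif_neg hxsne, ← hm, hgetA, hxsm, ivSearch]
      set p : Int × Int := intervals[(l + t).toNat] with hp
      simp only [List.get_eq_getElem, ← hp]
      by_cases h1 : target < p.1
      · rw [if_pos h1, if_pos h1]
        rw [IH intervals target l (l + t - 1) (by omega) (by omega) (by omega)]
        congr 2
        rw [hxs, List.take_take]
        congr 1; omega
      · rw [if_neg h1, if_neg h1]
        by_cases h2 : target > p.2
        · rw [if_pos h2, if_pos h2]
          rw [IH intervals target (l + t + 1) r (by omega) (by omega) (by omega)]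
          congr 2
          rw [hxs, List.drop_take, List.drop_drop]
          congr 1
          · omega
          · congr 1; omega
        · rw [if_neg h2, if_neg h2]
    · simp only [if_neg hlr]
      have h0 : (r + 1 - l).toNat = 0 := by omega
      rw [h0]
      simp [ivBuild, ivSearch]

-- ===== VERDICT (by name: the statement is the Claim_ definition above) =====
theorem exists_in_interval_bs_spec : Claim_equal_exists_in_interval_bs := by
  intro intervals target _
  unfold Spec_exists_in_interval_bs exists_in_interval_bs exists_in_interval_bs_alt
  have h := bsLoopA_eq_search (intervals.length + 1) intervals target 0
      ((intervals.length : Int) - 1) (by omega) (by omega) (by omega)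
  simpa using h
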